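-- pv_equiv track=rewrite | github.com/briandk/advent-of-code-2018 | 02/advent-of-code-scratch.py | compare_two_words
-- ===== SOURCE A (Python) =====
-- def compare_two_words(w1, w2):
-- 	common_characters = list()
-- 	discrepancy = 0
-- 	for (position, character) in enumerate(w1):
-- 		if (character is w2[position]):
-- 			common_characters.append(w1[position])
-- 		else:
-- 			discrepancy += 1
-- 	return (discrepancy, "".join(common_characters))
-- ===== SOURCE B (Python) =====
-- def compare_two_words(w1, w2):
-- 	def go(lo, hi):
-- 		if hi - lo == 0:
-- 			return (0, "")
-- 		if hi - lo == 1: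
-- 			return (0, w1[lo]) if w1[lo] is w2[lo] else (1, "")
-- 		mid = (lo + hi) // 2
-- 		d1, c1 = go(lo, mid)
-- 		d2, c2 = go(mid, hi)
-- 		return (d1 + d2, c1 + c2)
-- 	return go(0, len(w1))
-- ===== Notes on version B (the rewrite author's own statement) =====
-- stated objective: alternative
-- what changed: B replaces A's single indexed left-to-right loop with list/counter state by a divide-and-conquer recursion over index ranges: leaves compare one position, internal nodes split the range at the midpoint and merge (sum of discrepancies, concatenation of common characters).
import Mathlib
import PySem

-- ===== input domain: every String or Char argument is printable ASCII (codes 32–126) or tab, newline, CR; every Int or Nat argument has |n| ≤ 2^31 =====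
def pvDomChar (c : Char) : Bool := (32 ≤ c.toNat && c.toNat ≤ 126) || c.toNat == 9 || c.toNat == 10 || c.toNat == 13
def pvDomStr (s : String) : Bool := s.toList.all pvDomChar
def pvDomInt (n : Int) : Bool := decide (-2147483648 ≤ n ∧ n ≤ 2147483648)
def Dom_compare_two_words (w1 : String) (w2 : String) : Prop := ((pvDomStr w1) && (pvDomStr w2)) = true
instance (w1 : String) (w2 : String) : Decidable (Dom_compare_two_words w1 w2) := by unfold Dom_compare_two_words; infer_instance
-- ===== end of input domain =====

-- B replaces A's single indexed left-to-right loop (list + counter state) by a divide-and-conquer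
-- recursion over index ranges: leaves compare one position, internal nodes split at the midpoint and
-- merge (sum of discrepancies, concatenation of common characters) (objective: alternative).
-- On ASCII strings CPython's `c is w2[i]` coincides with character equality (1-char interning).

-- ===== PORT A =====
-- A's loop: state (common_characters, discrepancy); `w2[position]` via pyGet? (none = IndexError,
-- excluded by Pre_; the state is returned unchanged there, which Pre_ makes unreachable).
def compare_two_words (w1 : String) (w2 : String) : Int × String :=
  let r := (PySem.List.enumerate w1.toList).foldl
    (fun (st : List Char × Int) pc =>
      match PySem.Str.pyGet? w2 pc.1 with
      | some c2 => if pc.2 = c2 then (st.1 ++ [pc.2], st.2) else (st.1, st.2 + 1)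
      | none => st)
    ([], 0)
  (r.2, String.ofList r.1)

-- ===== PORT B =====
-- Source B's inner `go(lo, hi)`: divide and conquer on the index range [lo, hi) of w1.
-- In the one-position leaf, out-of-range indexing is a Python IndexError (excluded by Pre_);
-- the port returns (1, []) there, unreachable under Pre_.
def pvGo (w1 w2 : List Char) (lo hi : Nat) : Int × List Char :=
  if _h0 : hi - lo = 0 then (0, [])
  else if _h1 : hi - lo = 1 then
    match w1[lo]?, w2[lo]? with
    | some a, some b => if a = b then (0, [a]) else (1, [])
    | _, _ => (1, [])
  else
    let r1 := pvGo w1 w2 lo ((lo + hi) / 2)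
    let r2 := pvGo w1 w2 ((lo + hi) / 2) hi
    (r1.1 + r2.1, r1.2 ++ r2.2)
termination_by hi - lo
decreasing_by all_goals omega

def compare_two_words_alt (w1 : String) (w2 : String) : Int × String :=
  let r := pvGo w1.toList w2.toList 0 w1.toList.length
  (r.1, String.ofList r.2)

-- ===== PRECONDITION & SPEC =====
-- Pre_ excludes exactly the inputs where Python raises IndexError (w2 shorter than w1).
def Pre_compare_two_words (w1 : String) (w2 : String) : Prop := w1.toList.length ≤ w2.toList.length
instance (w1 : String) (w2 : String) : Decidable (Pre_compare_two_words w1 w2) := by unfold Pre_compare_two_words; infer_instance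
def pvWitness_compare_two_words : String × String := ("abcde", "axcye")

def Spec_compare_two_words (w1 : String) (w2 : String) (out : Int × String) : Prop := out = compare_two_words_alt w1 w2
instance (w1 : String) (w2 : String) (out : Int × String) : Decidable (Spec_compare_two_words w1 w2 out) := by unfold Spec_compare_two_words; infer_instance

-- ===== CLAIM (what is proved, stated in full; the proofs are below) =====
def Claim_equal_compare_two_words : Prop := ∀ (w1 : String) (w2 : String), Dom_compare_two_words w1 w2 → Pre_compare_two_words w1 w2 → Spec_compare_two_words w1 w2 (compare_two_words w1 w2)

-- ===== LEMMAS AND PROOFS =====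

-- Canonical per-position match (proof-only helper).
def pvMatch (w1 w2 : List Char) (i : Nat) : Option Char :=
  match w1[i]?, w2[i]? with
  | some a, some b => if a = b then some a else none
  | _, _ => none

-- Loop invariant for A's fold, with the w2-lookup abstracted as g.
theorem fold_inv (g : Int → Option Char) (l : List (Int × Char)) (acc : List Char) (d : Int) :
    l.foldl
      (fun (st : List Char × Int) pc =>
        match g pc.1 with
        | some c2 => if pc.2 = c2 then (st.1 ++ [pc.2], st.2) else (st.1, st.2 + 1)
        | none => st)
      (acc, d)
  = (acc ++ l.filterMap (fun pc => match g pc.1 with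
        | some c2 => if pc.2 = c2 then some pc.2 else none
        | none => none),
     d + ((l.length : Int)
          - (l.countP (fun pc => match g pc.1 with
               | some c2 => pc.2 = c2
               | none => true)))) := by
  induction l generalizing acc d with
  | nil => simp
  | cons hd tl ih =>
    simp only [List.foldl_cons, List.filterMap_cons, List.countP_cons, List.length_cons]
    cases h : g hd.1 with
    | none =>
      simp only [ih, Prod.mk.injEq]
      refine ⟨by simp, ?_⟩
      push_cast; ring
    | some c2 =>
      by_cases hc : hd.2 = c2
      · simp only [hc, if_pos, ih, Prod.mk.injEq]
        simp only [decide_true, if_pos]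
        refine ⟨by simp, ?_⟩
        push_cast; ring
      · simp only [if_neg hc, ih, Prod.mk.injEq]
        simp only [hc, decide_false, Bool.false_eq_true, if_neg, not_false_iff]
        refine ⟨trivial, ?_⟩
        push_cast; ring

-- When every lookup succeeds, the countP counts exactly the matches kept by the filterMap.
theorem countP_eq_filterMap_length (g : Int → Option Char) (l : List (Int × Char))
    (h : ∀ pc ∈ l, (g pc.1).isSome) :
    l.countP (fun pc => match g pc.1 with
        | some c2 => pc.2 = c2
        | none => true)
      = (l.filterMap (fun pc => match g pc.1 with
          | some c2 => if pc.2 = c2 then some pc.2 else none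
          | none => none)).length := by
  induction l with
  | nil => simp
  | cons hd tl ih =>
    have hhd := h hd (List.mem_cons_self ..)
    have htl : ∀ pc ∈ tl, (g pc.1).isSome :=
      fun pc hm => h pc (List.mem_cons_of_mem _ hm)
    cases hg : g hd.1 with
    | none => rw [hg] at hhd; simp at hhd
    | some c2 =>
      by_cases hc : hd.2 = c2
      · simp [hg, hc, ih htl]
      · simp [hg, hc, ih htl]

theorem enumerate_idx_inrange (w1 w2 : String) (hpre : w1.toList.length ≤ w2.toList.length) :
    ∀ pc ∈ PySem.List.enumerate w1.toList, (PySem.Str.pyGet? w2 pc.1).isSome := by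
  intro pc hm
  rcases (PySem.List.mem_enumerate_iff _ _ _).1 hm with ⟨k, hk, rfl⟩
  have hk2 : k < w2.toList.length := lt_of_lt_of_le hk hpre
  simp only [zero_add]
  rw [show ((k : Int)) = ((k : Nat) : Int) from rfl, PySem.Str.pyGet?_natCast]
  simp [List.getElem?_eq_getElem hk2]

-- A's enumerate-based filterMap equals the canonical range'-based one.
theorem enum_bridge (w1l : List Char) (w2 : String) :
    ∀ (n s : Nat), s + n = w1l.length →
    (PySem.List.enumerate (w1l.drop s) (s : Int)).filterMap
        (fun pc => match PySem.Str.pyGet? w2 pc.1 with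
          | some c2 => if pc.2 = c2 then some pc.2 else none
          | none => none)
      = (List.range' s n).filterMap (pvMatch w1l w2.toList) := by
  intro n
  induction n with
  | zero =>
    intro s hs
    have : w1l.drop s = [] := List.drop_eq_nil_of_le (by omega)
    simp [this]
  | succ m ih =>
    intro s hs
    have hslt : s < w1l.length := by omega
    rw [List.drop_eq_getElem_cons hslt, PySem.List.enumerate_cons, List.filterMap_cons]
    have hcast : (s : Int) + 1 = ((s + 1 : Nat) : Int) := by push_cast; ring
    rw [hcast, ih (s + 1) (by omega)]
    have hrange : List.range' s (m + 1) = s :: List.range' (s + 1) m := by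
      simp [List.range']
    rw [hrange, List.filterMap_cons]
    cases h2 : w2.toList[s]? with
    | none => simp [pvMatch, h2, List.getElem?_eq_getElem hslt]
    | some c2 =>
      by_cases hc : w1l[s] = c2 <;>
        simp [pvMatch, h2, hc, List.getElem?_eq_getElem hslt]

-- B's divide and conquer computes the canonical form on the range [lo, hi).
theorem pvGo_eq (w1l w2l : List Char) (hw : w1l.length ≤ w2l.length) :
    ∀ (k lo hi : Nat), hi - lo = k → lo ≤ hi → hi ≤ w1l.length →
    pvGo w1l w2l lo hi
      = (((hi - lo : Nat) : Int) - ((List.range' lo (hi - lo)).filterMap (pvMatch w1l w2l)).length,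
         (List.range' lo (hi - lo)).filterMap (pvMatch w1l w2l)) := by
  intro k
  induction k using Nat.strong_induction_on with
  | _ k ih =>
    intro lo hi hk hle hhi
    rw [pvGo]
    by_cases h0 : hi - lo = 0
    · rw [dif_pos h0, h0]
      simp
    · rw [dif_neg h0]
      by_cases h1 : hi - lo = 1
      · rw [dif_pos h1, h1]
        have hlt : lo < w1l.length := by omega
        have hlt2 : lo < w2l.length := by omega
        rw [List.getElem?_eq_getElem hlt, List.getElem?_eq_getElem hlt2]
        by_cases hc : w1l[lo] = w2l[lo] <;>
          simp [hc, pvMatch, List.getElem?_eq_getElem hlt, List.getElem?_eq_getElem hlt2,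
            List.range'_one]
      · rw [dif_neg h1]
        rw [ih ((lo + hi) / 2 - lo) (by omega) lo ((lo + hi) / 2) rfl (by omega) (by omega),
            ih (hi - (lo + hi) / 2) (by omega) ((lo + hi) / 2) hi rfl (by omega) hhi]
        have hsplit : List.range' lo (hi - lo)
            = List.range' lo ((lo + hi) / 2 - lo) ++ List.range' ((lo + hi) / 2) (hi - (lo + hi) / 2) := by
          have h := @List.range'_append lo ((lo + hi) / 2 - lo) (hi - (lo + hi) / 2) 1
          simp only [one_mul] at h
          rw [show lo + ((lo + hi) / 2 - lo) = (lo + hi) / 2 by omega] at h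
          rw [show (lo + hi) / 2 - lo + (hi - (lo + hi) / 2) = hi - lo by omega] at h
          exact h.symm
        rw [hsplit, List.filterMap_append]
        simp only [Prod.mk.injEq, List.length_append]
        constructor
        · push_cast [Nat.cast_sub (show lo ≤ (lo + hi) / 2 by omega),
            Nat.cast_sub (show (lo + hi) / 2 ≤ hi by omega), Nat.cast_sub hle]
          ring
        · trivial

-- ===== VERDICT (by name: the statement is the Claim_ definition above) =====
theorem compare_two_words_spec : Claim_equal_compare_two_words := by
  intro w1 w2 _ hpre
  unfold Spec_compare_two_words compare_two_words compare_two_words_alt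
  have hin := enumerate_idx_inrange w1 w2 hpre
  rw [fold_inv (PySem.Str.pyGet? w2),
      countP_eq_filterMap_length (PySem.Str.pyGet? w2) _ hin]
  have hlen : (PySem.List.enumerate w1.toList).length = w1.toList.length :=
    PySem.List.length_enumerate ..
  have hb := enum_bridge w1.toList w2 w1.toList.length 0 (by simp)
  simp only [List.drop_zero, Nat.cast_zero] at hb
  rw [pvGo_eq w1.toList w2.toList hpre _ 0 w1.toList.length rfl (by omega) le_rfl]
  simp only [Nat.sub_zero]
  rw [hb, hlen]
  simp
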